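-- pv_equiv track=rewrite | github.com/AlekseyKravchuk/coursera_dstructs_and_algorithms_spec | 01_algorithmic_toolbox/week_4/4.5_organizing_lottery_or_points_and_segments_ver.2.py | points_coverage_by_segments
-- ===== SOURCE A (Python) =====
-- from collections import defaultdict
-- from collections import Counter
--
-- def points_coverage_by_segments(coord_type_map, points):
--     cntr_dict = defaultdict(int)
--     points = sorted(points)
--
--     # scanning sorted points from left to right
--     cnt = 0
--     for coord in sorted(list(coord_type_map.keys())):
--         if len(coord_type_map[coord]) == 1:
--             if coord_type_map[coord][0] == 'l':
--                 cnt += 1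
--             elif coord_type_map[coord][0] == 'r':
--                 cnt -= 1
--             elif coord_type_map[coord][0] == 'p':
--                 cntr_dict[coord] = cnt
--         else:  # handle case when current point and beginning of the segments (l) and the end of segments (r) coincide
--             cnt_by_types = Counter(coord_type_map[coord])
--             cnt += cnt_by_types['l']
--             if 'p' in cnt_by_types:
--                 cntr_dict[coord] = cnt
--             cnt -= cnt_by_types['r']
--     return cntr_dict
-- ===== SOURCE B (Python) =====
-- from collections import defaultdict
--
--
-- def points_coverage_by_segments(coord_type_map, points):
--     # Direct counting instead of a running sweep: a query coord c is covered by
--     # (# segment starts <= c) - (# segment ends < c).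
--     starts = [c for c, types in coord_type_map.items() for t in types if t == 'l']
--     ends = [c for c, types in coord_type_map.items() for t in types if t == 'r']
--     queries = sorted(c for c, types in coord_type_map.items() if 'p' in types)
--     result = defaultdict(int)
--     for c in queries:
--         result[c] = sum(1 for s in starts if s <= c) - sum(1 for e in ends if e < c)
--     return result
-- ===== Notes on version B (the rewrite author's own statement) =====
-- stated objective: simpler
-- what changed: Replaces A's sorted sweep with a running counter and a per-coordinate Counter dispatch by direct counting: collect start/end/query coordinate lists once, then each query's coverage is (# starts <= c) - (# ends < c).
import Mathlib
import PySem

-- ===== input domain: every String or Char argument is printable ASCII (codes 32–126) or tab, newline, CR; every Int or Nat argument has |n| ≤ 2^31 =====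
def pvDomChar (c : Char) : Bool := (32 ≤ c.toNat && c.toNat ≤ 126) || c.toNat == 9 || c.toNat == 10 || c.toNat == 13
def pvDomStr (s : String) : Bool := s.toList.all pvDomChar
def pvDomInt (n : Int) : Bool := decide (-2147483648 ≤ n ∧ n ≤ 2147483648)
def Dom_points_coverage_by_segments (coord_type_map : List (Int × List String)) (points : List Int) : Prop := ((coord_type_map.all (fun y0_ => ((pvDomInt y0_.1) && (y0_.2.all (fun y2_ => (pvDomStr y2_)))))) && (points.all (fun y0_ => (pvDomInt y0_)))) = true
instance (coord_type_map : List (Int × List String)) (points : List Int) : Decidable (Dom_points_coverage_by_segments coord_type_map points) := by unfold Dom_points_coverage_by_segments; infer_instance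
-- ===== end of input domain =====

-- B replaces A's running-counter sweep by direct counting per query coordinate
-- (coverage = #starts ≤ c − #ends < c); objective: simpler.

-- ===== PORT A =====
def points_coverage_by_segments (coord_type_map : List (Int × List String)) (points : List Int) : List (Int × Int) :=
  let d : PySem.Dict Int (List String) := PySem.Dict.mk coord_type_map
  -- points = sorted(points): Python rebinds the parameter; the value is never read afterwards
  let _points := PySem.List.sorted points (fun x => x) false
  let res := (PySem.List.sorted d.keys (fun x => x) false).foldl
    (fun (st : Int × PySem.Dict Int Int) coord =>
      -- coord_type_map[coord]: coord is one of the dict's keys, so KeyError is impossible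
      let ts := (d.get? coord).getD []
      if ts.length == 1 then
        if PySem.List.pyGetD ts 0 "" == "l" then (st.1 + 1, st.2)
        else if PySem.List.pyGetD ts 0 "" == "r" then (st.1 - 1, st.2)
        else if PySem.List.pyGetD ts 0 "" == "p" then (st.1, st.2.insert coord st.1)
        else st
      else
        let cntByTypes := PySem.Dict.counter ts
        let cnt1 := st.1 + cntByTypes.getD "l" 0
        let st2 := if cntByTypes.contains "p" then st.2.insert coord cnt1 else st.2
        (cnt1 - cntByTypes.getD "r" 0, st2))
    ((0 : Int), (PySem.Dict.empty : PySem.Dict Int Int))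
  res.2.items

-- ===== PORT B =====
def points_coverage_by_segments_alt (coord_type_map : List (Int × List String)) (points : List Int) : List (Int × Int) :=
  let items := (PySem.Dict.mk coord_type_map).items
  let starts := items.flatMap (fun it => (it.2.filter (fun t => t == "l")).map (fun _ => it.1))
  let ends := items.flatMap (fun it => (it.2.filter (fun t => t == "r")).map (fun _ => it.1))
  let queries := PySem.List.sorted ((items.filter (fun it => it.2.contains "p")).map (fun it => it.1)) (fun x => x) false
  let res := queries.foldl
    (fun (r : PySem.Dict Int Int) c =>
      r.insert c ((starts.foldl (fun acc s => if s ≤ c then acc + 1 else acc) (0 : Int)) -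
                  (ends.foldl (fun acc e => if e < c then acc + 1 else acc) (0 : Int))))
    (PySem.Dict.empty : PySem.Dict Int Int)
  res.items

-- ===== PRECONDITION & SPEC =====
-- Pre_ requires the association list's keys to be distinct: the Python argument is a dict,
-- whose keys are necessarily unique, so a duplicate-keyed list represents no Python input.
def Pre_points_coverage_by_segments (coord_type_map : List (Int × List String)) (points : List Int) : Prop :=
  (coord_type_map.map Prod.fst).Nodup

instance (coord_type_map : List (Int × List String)) (points : List Int) : Decidable (Pre_points_coverage_by_segments coord_type_map points) := by unfold Pre_points_coverage_by_segments; infer_instance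

def pvWitness_points_coverage_by_segments : (List (Int × List String)) × List Int :=
  ([(1, ["l"]), (3, ["p"]), (5, ["r"])], [3])

def Spec_points_coverage_by_segments (coord_type_map : List (Int × List String)) (points : List Int) (out : List (Int × Int)) : Prop := out = points_coverage_by_segments_alt coord_type_map points
instance (coord_type_map : List (Int × List String)) (points : List Int) (out : List (Int × Int)) : Decidable (Spec_points_coverage_by_segments coord_type_map points out) := by unfold Spec_points_coverage_by_segments; infer_instance

-- ===== CLAIM (what is proved, stated in full; the proofs are below) =====
def Claim_equal_points_coverage_by_segments : Prop := ∀ (coord_type_map : List (Int × List String)) (points : List Int), Dom_points_coverage_by_segments coord_type_map points → Pre_points_coverage_by_segments coord_type_map points → Spec_points_coverage_by_segments coord_type_map points (points_coverage_by_segments coord_type_map points)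

-- ===== LEMMAS AND PROOFS =====

def pvTs (ctm : List (Int × List String)) (c : Int) : List String :=
  ((PySem.Dict.mk ctm).get? c).getD []
def pvL (ctm : List (Int × List String)) (c : Int) : Int := ((pvTs ctm c).count "l" : Int)
def pvR (ctm : List (Int × List String)) (c : Int) : Int := ((pvTs ctm c).count "r" : Int)
def pvP (ctm : List (Int × List String)) (c : Int) : Bool := (pvTs ctm c).contains "p"
theorem pv_step_generic (ts : List String) (st : Int × PySem.Dict Int Int) (c : Int) :
    (if ts.length == 1 then
       if PySem.List.pyGetD ts 0 "" == "l" then (st.1 + 1, st.2)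
       else if PySem.List.pyGetD ts 0 "" == "r" then (st.1 - 1, st.2)
       else if PySem.List.pyGetD ts 0 "" == "p" then (st.1, st.2.insert c st.1)
       else st
     else
       let cntByTypes := PySem.Dict.counter ts
       let cnt1 := st.1 + cntByTypes.getD "l" 0
       let st2 := if cntByTypes.contains "p" then st.2.insert c cnt1 else st.2
       (cnt1 - cntByTypes.getD "r" 0, st2))
    = (st.1 + (ts.count "l" : Int) - (ts.count "r" : Int),
       if ts.contains "p" then st.2.insert c (st.1 + (ts.count "l" : Int)) else st.2) := by
  rcases ts with _ | ⟨t, ts'⟩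
  · simp [PySem.Dict.getD_counter, PySem.Dict.contains_counter]
  · rcases ts' with _ | ⟨t2, ts''⟩
    · simp only [List.length_cons, List.length_nil, PySem.List.pyGetD_zero_cons]
      by_cases h1 : t = "l"
      · subst h1; simp
      · by_cases h2 : t = "r"
        · subst h2; simp [h1]
        · by_cases h3 : t = "p"
          · subst h3; simp [h1, h2]
          · have h3' : ¬ ("p" = t) := fun h => h3 h.symm
            simp [h1, h2, h3, h3']
    · simp [PySem.Dict.getD_counter, PySem.Dict.contains_counter]

theorem pv_sweep (Lf Rf : Int → Int) (P : Int → Bool) (ks : List Int)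
    (hks : ks.Pairwise (· < ·)) :
    ∀ (n0 : Int) (d0 : PySem.Dict Int Int),
    (ks.foldl (fun st c => (st.1 + Lf c - Rf c, if P c then st.2.insert c (st.1 + Lf c) else st.2)) (n0, d0)).2
    = (ks.filter P).foldl
        (fun d c => d.insert c (n0 + ((ks.map (fun k => if k ≤ c then Lf k else 0)).sum -
                                      (ks.map (fun k => if k < c then Rf k else 0)).sum))) d0 := by
  induction ks with
  | nil => intro n0 d0; simp
  | cons c t ih =>
    intro n0 d0
    rcases List.pairwise_cons.mp hks with ⟨hlt, ht⟩
    rw [List.foldl_cons, ih ht]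
    have hcovc : (((c :: t).map (fun k => if k ≤ c then Lf k else 0)).sum -
                  ((c :: t).map (fun k => if k < c then Rf k else 0)).sum) = Lf c := by
      simp only [List.map_cons, List.sum_cons]
      have h1 : (t.map (fun k => if k ≤ c then Lf k else 0)).sum = 0 := by
        apply List.sum_eq_zero
        intro x hx
        rcases List.mem_map.mp hx with ⟨k, hk, rfl⟩
        simp [not_le.mpr (hlt k hk)]
      have h2 : (t.map (fun k => if k < c then Rf k else 0)).sum = 0 := by
        apply List.sum_eq_zero
        intro x hx
        rcases List.mem_map.mp hx with ⟨k, hk, rfl⟩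
        have := hlt k hk
        simp [not_lt.mpr (le_of_lt this)]
      simp [h1, h2]
    have hcovt : ∀ k ∈ t.filter P,
        n0 + Lf c - Rf c + ((t.map (fun j => if j ≤ k then Lf j else 0)).sum -
                            (t.map (fun j => if j < k then Rf j else 0)).sum)
        = n0 + (((c :: t).map (fun j => if j ≤ k then Lf j else 0)).sum -
                ((c :: t).map (fun j => if j < k then Rf j else 0)).sum) := by
      intro k hk
      have hck := hlt k (List.mem_of_mem_filter hk)
      simp only [List.map_cons, List.sum_cons, if_pos (le_of_lt hck), if_pos hck]
      ring
    by_cases hP : P c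
    · rw [List.filter_cons_of_pos hP, List.foldl_cons]
      dsimp only
      simp only [if_pos hP, hcovc]
      apply PySem.List.foldl_congr_mem
      intro d k hk
      rw [← hcovt k hk]
    · rw [List.filter_cons_of_neg (by simp [hP])]
      dsimp only
      simp only [if_neg hP]
      apply PySem.List.foldl_congr_mem
      intro d k hk
      rw [← hcovt k hk]

theorem pv_items_foldl_insert (v : Int → Int) (cs : List Int) :
    ∀ (d : PySem.Dict Int Int), cs.Nodup → (∀ c ∈ cs, d.contains c = false) →
    (cs.foldl (fun d c => d.insert c (v c)) d).items = d.items ++ cs.map (fun c => (c, v c)) := by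
  induction cs with
  | nil => intro d _ _; simp
  | cons c t ih =>
    intro d hnd hfresh
    rw [List.foldl_cons, ih _ (List.nodup_cons.mp hnd).2]
    · rw [PySem.Dict.items_insert_of_not_contains d (v c) (hfresh c (List.mem_cons_self ..))]
      simp
    · intro c' hc'
      have hne : c' ≠ c := fun h => (List.nodup_cons.mp hnd).1 (h ▸ hc')
      have hkeys := PySem.Dict.keys_insert_of_not_contains d (v c) (hfresh c (List.mem_cons_self ..))
      have : ¬ c' ∈ (d.insert c (v c)).keys := by
        rw [hkeys]
        simp only [List.mem_append, List.mem_singleton]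
        rintro (h | h)
        · exact absurd ((PySem.Dict.contains_iff_mem_keys d c').mpr h)
            (by simp [hfresh c' (List.mem_cons_of_mem _ hc')])
        · exact hne h
      exact Bool.eq_false_iff.mpr (fun hcon => this ((PySem.Dict.contains_iff_mem_keys _ _).mp hcon))

theorem pv_get?_mk_of_mem (ctm : List (Int × List String))
    (h : (ctm.map Prod.fst).Nodup) (it : Int × List String) (hm : it ∈ ctm) :
    (PySem.Dict.mk ctm).get? it.1 = some it.2 := by
  induction ctm with
  | nil => cases hm
  | cons hd t ih =>
    rw [PySem.Dict.get?_mk_cons]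
    rcases List.mem_cons.mp hm with rfl | hmt
    · simp
    · have h' := h
      rw [List.map_cons] at h'
      obtain ⟨hnotin, hnd⟩ := List.nodup_cons.mp h'
      have hne : hd.1 ≠ it.1 := by
        intro he
        exact hnotin (he ▸ (List.mem_map_of_mem hmt : it.1 ∈ t.map Prod.fst))
      simp only [beq_iff_eq, if_neg hne]
      exact ih hnd hmt

theorem pv_countP_flat (q : Int → Prop) [DecidablePred q] (lab : String) (l : List (Int × List String)) :
    (((l.flatMap (fun it => (it.2.filter (fun t => t == lab)).map (fun _ => it.1))).countP
        (fun s => decide (q s)) : Nat) : Int)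
    = (l.map (fun it => if q it.1 then (it.2.count lab : Int) else 0)).sum := by
  induction l with
  | nil => simp
  | cons hd t ih =>
    rw [List.flatMap_cons, List.countP_append, List.map_cons, List.sum_cons, ← ih]
    rw [List.countP_map]
    by_cases hq : q hd.1
    · simp [hq, Function.comp_def, List.countP_eq_length_filter, List.count]
    · simp [hq, Function.comp_def]

theorem pv_sum_over_keys (ctm : List (Int × List String)) (hpre : (ctm.map Prod.fst).Nodup)
    (ks : List Int) (hperm : ks.Perm (ctm.map Prod.fst))
    (q : Int → Prop) [DecidablePred q] (lab : String) :
    (ctm.map (fun it => if q it.1 then (it.2.count lab : Int) else 0)).sum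
    = (ks.map (fun k => if q k then ((pvTs ctm k).count lab : Int) else 0)).sum := by
  have h1 : ctm.map (fun it => if q it.1 then (it.2.count lab : Int) else 0)
      = ctm.map ((fun k => if q k then ((pvTs ctm k).count lab : Int) else 0) ∘ Prod.fst) := by
    apply List.map_congr_left
    intro it hit
    have := pv_get?_mk_of_mem ctm hpre it hit
    simp [pvTs, this]
  rw [h1, ← List.map_map]
  exact (List.Perm.map _ hperm).sum_eq.symm


-- ===== VERDICT (by name: the statement is the Claim_ definition above) =====
theorem points_coverage_by_segments_spec : Claim_equal_points_coverage_by_segments := by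
  intro ctm pts _ hpre
  unfold Spec_points_coverage_by_segments
  unfold Pre_points_coverage_by_segments at hpre
  -- common data
  have hkeys : (PySem.Dict.mk ctm).keys = ctm.map Prod.fst := rfl
  set ks := PySem.List.sorted (PySem.Dict.mk ctm).keys (fun x => x) false with hks_def
  have hperm : ks.Perm (ctm.map Prod.fst) := hkeys ▸ PySem.List.sorted_perm _ _ _
  have hnodup : ks.Nodup := hperm.nodup_iff.mpr hpre
  have hpw : ks.Pairwise (· < ·) := by
    have hle : ks.Pairwise (fun a b => a ≤ b) := PySem.List.sorted_pairwise _ _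
    exact (hle.and hnodup).imp (fun h => lt_of_le_of_ne h.1 h.2)
  -- A side
  have hA : points_coverage_by_segments ctm pts
      = (ks.filter (pvP ctm)).map (fun c => (c, (0:Int) +
          ((ks.map (fun k => if k ≤ c then pvL ctm k else 0)).sum -
           (ks.map (fun k => if k < c then pvR ctm k else 0)).sum))) := by
    unfold points_coverage_by_segments
    dsimp only
    rw [PySem.List.foldl_congr_mem _ _
        (fun (st : Int × PySem.Dict Int Int) c =>
          (st.1 + pvL ctm c - pvR ctm c, if pvP ctm c then st.2.insert c (st.1 + pvL ctm c) else st.2)) _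
        (fun acc x _ => pv_step_generic (((PySem.Dict.mk ctm).get? x).getD []) acc x)]
    rw [pv_sweep (pvL ctm) (pvR ctm) (pvP ctm) ks hpw 0 PySem.Dict.empty]
    rw [pv_items_foldl_insert _ _ _ ((hnodup.filter _))
        (fun c _ => by simp [PySem.Dict.empty, PySem.Dict.contains_mk])]
    simp [PySem.Dict.empty]
  -- B side: queries = ks.filter (pvP ctm)
  have hvp : ∀ it ∈ ctm, (it.2.contains "p") = pvP ctm it.1 := by
    intro it hit
    have := pv_get?_mk_of_mem ctm hpre it hit
    simp [pvP, pvTs, this]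
  have hq : PySem.List.sorted ((ctm.filter (fun it => it.2.contains "p")).map (fun it => it.1)) (fun x => x) false
      = ks.filter (pvP ctm) := by
    apply PySem.List.sorted_eq_of_perm_of_pairwise_lt
    · have h1 : (ctm.filter (fun it => it.2.contains "p")).map (fun it => it.1)
          = (ctm.map Prod.fst).filter (fun k => pvP ctm k) := by
        rw [List.filter_map]
        have : ctm.filter ((fun k => pvP ctm k) ∘ Prod.fst) = ctm.filter (fun it => it.2.contains "p") := by
          apply List.filter_congr
          intro it hit
          simp only [Function.comp_apply]
          exact (hvp it hit).symm
        rw [this]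
      rw [h1]
      exact (hperm.filter _)
    · exact hpw.filter _
  -- assemble
  rw [hA]
  unfold points_coverage_by_segments_alt
  dsimp only
  rw [hq]
  rw [pv_items_foldl_insert _ _ _ (hnodup.filter _)
      (fun c _ => by simp [PySem.Dict.empty, PySem.Dict.contains_mk])]
  simp only [PySem.Dict.empty, List.nil_append]
  apply List.map_congr_left
  intro c _
  refine Prod.ext rfl ?_
  dsimp only
  rw [PySem.List.foldl_ite_add_one (fun s => s ≤ c), PySem.List.foldl_ite_add_one (fun e => e < c)]
  rw [zero_add, zero_add]
  rw [pv_countP_flat (fun s => s ≤ c) "l", pv_countP_flat (fun e => e < c) "r"]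
  rw [pv_sum_over_keys ctm hpre ks hperm (fun s => s ≤ c) "l",
      pv_sum_over_keys ctm hpre ks hperm (fun e => e < c) "r"]
  rw [zero_add]
  rfl
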